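-- pv_equiv track=rewrite | github.com/scottsha/compute-n-loop | misc/worker.py | matrix_texter
-- ===== SOURCE A (Python) =====
-- def matrix_texter(M):
--     restrung=''
--     for a in str(M):
--         if a=='[':
--             restrung+='{'
--         elif a==' ':
--             restrung+=','
--         elif a==']':
--             restrung+='}'
--         elif a=='\n':
--             restrung+=','
--         else:
--             restrung+=a
--     restrung='{'+restrung
--     restrung=restrung+'}'
--     return restrung
-- ===== SOURCE B (Python) =====
-- def matrix_texter(M):
--     s = str(M).replace('[', '{').replace(']', '}').replace(' ', ',').replace('\n', ',')
--     return '{' + s + '}'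
-- ===== Notes on version B (the rewrite author's own statement) =====
-- stated objective: idiomatic
-- what changed: B replaces A's per-character if/elif accumulator loop with a chain of four whole-string str.replace passes and wraps the result.
import Mathlib
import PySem

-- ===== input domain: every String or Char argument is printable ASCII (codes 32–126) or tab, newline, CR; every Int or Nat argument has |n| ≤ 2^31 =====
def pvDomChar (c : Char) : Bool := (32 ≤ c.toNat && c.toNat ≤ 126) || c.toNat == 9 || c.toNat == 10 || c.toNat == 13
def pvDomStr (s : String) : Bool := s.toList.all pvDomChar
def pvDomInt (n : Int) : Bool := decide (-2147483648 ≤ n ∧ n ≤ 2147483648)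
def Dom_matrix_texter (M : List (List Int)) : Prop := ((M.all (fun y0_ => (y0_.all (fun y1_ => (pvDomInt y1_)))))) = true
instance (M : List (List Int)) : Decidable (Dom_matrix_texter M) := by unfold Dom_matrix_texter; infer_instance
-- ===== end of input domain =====

-- B replaces A's per-character if/elif accumulator loop with a chain of four
-- whole-string str.replace passes (objective: idiomatic).


-- ===== PORT A =====
-- str(row) for a Python list of ints: '[' + ', '.join(str(x)) + ']'  (exact: CPython repr)
def pyReprRow (r : List Int) : List Char :=
  '[' :: PySem.Chars.join [',', ' '] (r.map PySem.Int.toChars) ++ [']']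

-- str(M) for a Python list of lists of ints (exact: CPython repr)
def pyReprMatrix (M : List (List Int)) : List Char :=
  '[' :: PySem.Chars.join [',', ' '] (M.map pyReprRow) ++ [']']

-- A: for a in str(M): append the translated character to restrung; then wrap in '{' … '}'.
def matrix_texter (M : List (List Int)) : String :=
  let restrung : List Char :=
    (pyReprMatrix M).foldl (fun acc a =>
      if a = '[' then acc ++ ['{']
      else if a = ' ' then acc ++ [',']
      else if a = ']' then acc ++ ['}']
      else if a = '\n' then acc ++ [',']
      else acc ++ [a]) []
  String.ofList ('{' :: restrung ++ ['}'])

-- ===== PORT B =====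
-- B: s = str(M).replace('[','{').replace(']','}').replace(' ',',').replace('\n',','); '{'+s+'}'
-- (str.replace ported by PySem.Chars.replace on the repr's character list)
def matrix_texter_alt (M : List (List Int)) : String :=
  let s : List Char :=
    PySem.Chars.replace
      (PySem.Chars.replace
        (PySem.Chars.replace
          (PySem.Chars.replace (pyReprMatrix M) ['['] ['{'])
          [']'] ['}'])
        [' '] [','])
      ['\n'] [',']
  String.ofList ('{' :: s ++ ['}'])

-- ===== PRECONDITION & SPEC =====
def Spec_matrix_texter (M : List (List Int)) (out : String) : Prop := out = matrix_texter_alt M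
instance (M : List (List Int)) (out : String) : Decidable (Spec_matrix_texter M out) := by unfold Spec_matrix_texter; infer_instance

-- ===== CLAIM =====
def Claim_equal_matrix_texter : Prop := ∀ (M : List (List Int)), Dom_matrix_texter M → Spec_matrix_texter M (matrix_texter M)

-- ===== LEMMAS AND PROOFS =====

-- A's per-character translation, as a function.
def trChar (a : Char) : Char :=
  if a = '[' then '{'
  else if a = ' ' then ','
  else if a = ']' then '}'
  else if a = '\n' then ','
  else a

theorem foldl_tr (cs : List Char) (init : List Char) :
    cs.foldl (fun acc a =>
      if a = '[' then acc ++ ['{']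
      else if a = ' ' then acc ++ [',']
      else if a = ']' then acc ++ ['}']
      else if a = '\n' then acc ++ [',']
      else acc ++ [a]) init = init ++ cs.map trChar := by
  induction cs generalizing init with
  | nil => simp
  | cons c t ih =>
    simp only [List.foldl_cons, List.map_cons, ih, trChar]
    split_ifs <;> simp

-- Single-character replace is a map.
theorem replace_go_single (x y : Char) (fuel : Nat) :
    ∀ (l acc : List Char), l.length ≤ fuel →
      PySem.Chars.replace.go [x] [y] fuel l acc
        = acc.reverse ++ l.map (fun c => if c = x then y else c) := by
  induction fuel with
  | zero =>
    intro l acc h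
    have : l = [] := List.eq_nil_of_length_eq_zero (Nat.le_zero.mp h)
    subst this
    simp [PySem.Chars.replace.go]
  | succ f ih =>
    intro l acc h
    cases l with
    | nil => simp [PySem.Chars.replace.go]
    | cons c t =>
      simp only [PySem.Chars.replace.go]
      by_cases hxc : x = c
      · subst hxc
        have hp : List.isPrefixOf [x] (x :: t) = true := by
          simp [List.isPrefixOf]
        simp only [hp, if_true, List.length_cons] at *
        rw [show List.drop (List.length ([] : List Char) + 1) (x :: t) = t by simp]
        rw [ih t ([y].reverse ++ acc) (by omega)]
        simp
      · have hp : List.isPrefixOf [x] (c :: t) = false := by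
          simp [List.isPrefixOf, hxc]
        simp only [hp, Bool.false_eq_true, if_false, List.length_cons] at *
        rw [ih t (c :: acc) (by omega)]
        simp [Ne.symm hxc]

theorem replace_single (cs : List Char) (x y : Char) :
    PySem.Chars.replace cs [x] [y] = cs.map (fun c => if c = x then y else c) := by
  unfold PySem.Chars.replace
  simp only [List.isEmpty_cons, if_false, Bool.false_eq_true]
  exact replace_go_single x y cs.length cs [] le_rfl

-- ===== VERDICT =====
theorem matrix_texter_spec : Claim_equal_matrix_texter := by
  intro M _
  show matrix_texter M = matrix_texter_alt M
  unfold matrix_texter matrix_texter_alt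
  rw [foldl_tr]
  simp only [List.nil_append, replace_single, List.map_map]
  congr 3
  apply List.map_congr_left
  intro c _
  simp only [Function.comp, trChar]
  split_ifs <;> simp_all
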